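-- pv_equiv track=rewrite | github.com/akoshochrein/hackerrank | algorithms/implementation/priyanka-and-toys.py | priyanka_and_toys
-- ===== SOURCE A (Python) =====
-- CONTAINER_BUFFER = 4
--
-- def priyanka_and_toys(weights: list[int]) -> int:
--     if len(weights) == 0:
--         return 0
--
--     number_of_containers = 1
--     sorted_weights = sorted(weights)
--     current_container_maximum_weight = sorted_weights[0] + CONTAINER_BUFFER
--     for i in range(len(sorted_weights)):
--         weight = sorted_weights[i]
--         if weight > current_container_maximum_weight:
--             number_of_containers += 1
--             current_container_maximum_weight = weight + CONTAINER_BUFFER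
--
--     return number_of_containers
-- ===== SOURCE B (Python) =====
-- CONTAINER_BUFFER = 4
--
-- def priyanka_and_toys(weights: list[int]) -> int:
--     # No sorting: repeatedly pick the minimum of the remaining toys,
--     # discard every toy within min + CONTAINER_BUFFER (one container), count rounds.
--     count = 0
--     remaining = weights
--     while remaining:
--         m = min(remaining)
--         remaining = [w for w in remaining if w > m + CONTAINER_BUFFER]
--         count += 1
--     return count
-- ===== Notes on version B (the rewrite author's own statement) =====
-- stated objective: alternative
-- what changed: Eliminates sorting entirely: instead of A's sort followed by a threshold-tracking scan, B repeatedly takes the minimum of the remaining multiset and filters out all toys within min+4, counting one container per round.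
import Mathlib
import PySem

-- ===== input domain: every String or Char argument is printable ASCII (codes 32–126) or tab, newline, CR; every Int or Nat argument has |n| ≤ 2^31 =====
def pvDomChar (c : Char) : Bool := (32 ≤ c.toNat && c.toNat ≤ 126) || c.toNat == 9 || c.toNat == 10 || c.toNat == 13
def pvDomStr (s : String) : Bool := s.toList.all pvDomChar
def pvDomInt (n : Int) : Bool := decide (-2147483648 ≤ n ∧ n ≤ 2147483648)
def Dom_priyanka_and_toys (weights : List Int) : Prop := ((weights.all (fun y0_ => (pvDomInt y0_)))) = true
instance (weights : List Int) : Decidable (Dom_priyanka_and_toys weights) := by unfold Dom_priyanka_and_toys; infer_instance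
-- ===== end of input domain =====

-- B removes the sort: it repeatedly takes the minimum of the remaining toys and filters out
-- everything within min+4, counting one container per round; alternative algorithm, same results.

-- ===== PORT A =====
-- A: guard for empty, sort, threshold = first + 4, single pass updating (count, threshold).
def priyanka_and_toys (weights : List Int) : Int :=
  if weights.length = 0 then 0
  else
    let sorted_weights := PySem.List.sorted weights (fun x => x) false
    match PySem.List.pyGet? sorted_weights 0 with
    | none => 0  -- unreachable: sorted_weights is nonempty
    | some w0 =>
      (sorted_weights.foldl
        (fun (s : Int × Int) weight => if weight > s.2 then (s.1 + 1, weight + 4) else s)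
        (1, w0 + 4)).1

-- ===== PORT B =====
-- B: while remaining nonempty: m = min(remaining); remaining = [w for w in remaining if w > m+4]; count += 1.
-- The while loop is the recursion below (one step per container); count accumulates as +1 per step.
theorem pv_filter_len_lt (l : List Int) (m : Int) (hm : m ∈ l) :
    (l.filter (fun w => decide (m + 4 < w))).length < l.length := by
  rw [List.length_filter_lt_length_iff_exists]
  exact ⟨m, hm, by simp⟩

-- min of a nonempty list is the running-min fold, and it is one of the elements
theorem pv_foldl_min_mem (x : Int) (xs : List Int) : xs.foldl min x ∈ x :: xs := by
  induction xs generalizing x with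
  | nil => simp
  | cons a t ih =>
    simp only [List.foldl]
    rcases List.mem_cons.mp (ih (min x a)) with h | h
    · rcases min_choice x a with h' | h' <;> rw [h] <;> rw [h'] <;> simp
    · simp [h]

def priyanka_and_toys_alt : List Int → Int
  | [] => 0
  | x :: xs =>
    let m := xs.foldl min x   -- min(remaining) on a nonempty list = the running-min loop
    priyanka_and_toys_alt ((x :: xs).filter (fun w => decide (m + 4 < w))) + 1
termination_by l => l.length
decreasing_by
  simp only [List.foldl_attach]
  exact pv_filter_len_lt _ _ (pv_foldl_min_mem x xs)

-- ===== PRECONDITION & SPEC =====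
def Spec_priyanka_and_toys (weights : List Int) (out : Int) : Prop := out = priyanka_and_toys_alt weights
instance (weights : List Int) (out : Int) : Decidable (Spec_priyanka_and_toys weights out) := by unfold Spec_priyanka_and_toys; infer_instance

-- ===== CLAIM =====
def Claim_equal_priyanka_and_toys : Prop := ∀ (weights : List Int), Dom_priyanka_and_toys weights → Spec_priyanka_and_toys weights (priyanka_and_toys weights)

-- ===== LEMMAS AND PROOFS =====

-- On a weakly sorted list, the head is the minimum.
theorem pv_min_sorted (x : Int) (xs : List Int) (h : ∀ y ∈ xs, x ≤ y) :
    xs.foldl min x = x := by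
  induction xs generalizing x with
  | nil => rfl
  | cons a t ih =>
    have hx : x ≤ a := h a (by simp)
    simp only [List.foldl, min_eq_left hx]
    exact ih x (fun y hy => h y (by simp [hy]))

-- B's rounds are invariant under permutation (min and filter only see the multiset).
theorem pv_rounds_perm : ∀ n (l l' : List Int), l.length ≤ n → l.Perm l' →
    priyanka_and_toys_alt l = priyanka_and_toys_alt l' := by
  intro n
  induction n with
  | zero =>
    intro l l' hlen hp
    have : l = [] := List.eq_nil_of_length_eq_zero (Nat.le_zero.mp hlen)
    subst this
    rw [hp.nil_eq.symm]
  | succ n ih =>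
    intro l l' hlen hp
    match l, l' with
    | [], l' => rw [hp.nil_eq.symm]
    | x :: xs, [] => exact absurd hp.symm.nil_eq (by simp)
    | x :: xs, y :: ys =>
      -- the two minima agree: each is a member of the other list and a lower bound
      set m := xs.foldl min x with hm
      set m' := ys.foldl min y with hm'
      have hminx : PySem.List.min? (x :: xs) (fun y => y) = some m := by
        rw [PySem.List.min?_id_cons]
      have hminy : PySem.List.min? (y :: ys) (fun y => y) = some m' := by
        rw [PySem.List.min?_id_cons]
      have hmem : m ∈ y :: ys := hp.mem_iff.mp (pv_foldl_min_mem x xs)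
      have hmem' : m' ∈ x :: xs := hp.mem_iff.mpr (pv_foldl_min_mem y ys)
      have h1 : m ≤ m' := PySem.List.min?_isMin hminx m' hmem'
      have h2 : m' ≤ m := PySem.List.min?_isMin hminy m hmem
      have hmm : m' = m := le_antisymm h2 h1
      rw [priyanka_and_toys_alt, priyanka_and_toys_alt, ← hm, ← hm', hmm]
      have hpf : ((x :: xs).filter (fun w => decide (m + 4 < w))).Perm
          ((y :: ys).filter (fun w => decide (m + 4 < w))) := hp.filter _
      have hmemm : m ∈ x :: xs := by rw [hm]; exact pv_foldl_min_mem x xs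
      have hlen' : ((x :: xs).filter (fun w => decide (m + 4 < w))).length ≤ n := by
        have := pv_filter_len_lt (x :: xs) m hmemm
        omega
      rw [ih _ _ hlen' hpf]

-- A's fold over a weakly sorted tail equals c + rounds of the part above the threshold a+4.
theorem pv_fold_rounds : ∀ (l : List Int), l.Pairwise (· ≤ ·) → ∀ (c a : Int),
    (l.foldl (fun (s : Int × Int) weight => if weight > s.2 then (s.1 + 1, weight + 4) else s) (c, a + 4)).1
      = c + priyanka_and_toys_alt (l.filter (fun w => decide (a + 4 < w))) := by
  intro l
  induction l with
  | nil => intro _ c a; simp [priyanka_and_toys_alt]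
  | cons w t ih =>
    intro hpw c a
    have hle : ∀ y ∈ t, w ≤ y := (List.pairwise_cons.mp hpw).1
    have hpt : t.Pairwise (· ≤ ·) := (List.pairwise_cons.mp hpw).2
    by_cases h : a + 4 < w
    · -- w opens a new container
      have hfil : (w :: t).filter (fun v => decide (a + 4 < v)) = w :: t.filter (fun v => decide (a + 4 < v)) := by
        simp [List.filter, h]
      rw [hfil]
      have hmin : (t.filter (fun v => decide (a + 4 < v))).foldl min w = w :=
        pv_min_sorted w _ (fun y hy => hle y (List.mem_of_mem_filter hy))
      rw [priyanka_and_toys_alt]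
      simp only [hmin]
      have hff : (w :: t.filter (fun v => decide (a + 4 < v))).filter (fun v => decide (w + 4 < v))
          = t.filter (fun v => decide (w + 4 < v)) := by
        rw [List.filter_cons_of_neg (by simp), List.filter_filter]
        apply List.filter_congr
        intro v _
        by_cases hv : w + 4 < v
        · simp [hv]; omega
        · simp [hv]
      rw [hff]
      simp only [List.foldl, if_pos h]
      rw [ih hpt (c + 1) w]
      ring
    · -- w fits in the current container: both sides skip it
      have hfil : (w :: t).filter (fun v => decide (a + 4 < v)) = t.filter (fun v => decide (a + 4 < v)) := by
        simp [List.filter, h]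
      rw [hfil]
      simp only [List.foldl, if_neg (by omega : ¬ w > a + 4)]
      exact ih hpt c a

-- ===== VERDICT =====
theorem priyanka_and_toys_spec : Claim_equal_priyanka_and_toys := by
  intro weights _
  unfold Spec_priyanka_and_toys priyanka_and_toys
  by_cases hnil : weights = []
  · subst hnil; simp [priyanka_and_toys_alt]
  · have hlen : weights.length ≠ 0 := by simpa using hnil
    rw [if_neg hlen]
    have hsnil : PySem.List.sorted weights (fun x => x) false ≠ [] := by
      simpa [PySem.List.sorted_eq_nil_iff] using hnil
    obtain ⟨w0, t, hs⟩ := List.exists_cons_of_ne_nil hsnil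
    simp only [hs]
    have hget : PySem.List.pyGet? (w0 :: t) (0 : Int) = some w0 := by
      simp [PySem.List.pyGet?, PySem.List.pyIdx?]
    rw [hget]
    have hpw : (w0 :: t).Pairwise (· ≤ ·) := by
      have := PySem.List.sorted_pairwise weights (fun x => x) (κ := Int)
      rwa [hs] at this
    have hle : ∀ y ∈ t, w0 ≤ y := (List.pairwise_cons.mp hpw).1
    show ((w0 :: t).foldl (fun (s : Int × Int) weight => if weight > s.2 then (s.1 + 1, weight + 4) else s) (1, w0 + 4)).1
        = priyanka_and_toys_alt weights
    rw [pv_fold_rounds (w0 :: t) hpw 1 w0]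
    have hmin : t.foldl min w0 = w0 := pv_min_sorted w0 t hle
    have hrounds : priyanka_and_toys_alt (w0 :: t)
        = priyanka_and_toys_alt ((w0 :: t).filter (fun w => decide (w0 + 4 < w))) + 1 := by
      rw [priyanka_and_toys_alt]
      simp only [hmin]
    have hperm : (PySem.List.sorted weights (fun x => x) false).Perm weights :=
      PySem.List.sorted_perm weights (fun x => x) false
    rw [hs] at hperm
    rw [← pv_rounds_perm weights.length (w0 :: t) weights (by rw [hperm.length_eq]) hperm, hrounds]
    ring
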